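-- pv_equiv track=rewrite | github.com/py-in-the-sky/challenges | google-code-jam/file_fixit.py | file_fixit
-- ===== SOURCE A (Python) =====
-- from collections import defaultdict
--
-- ROOT_DIR = ''
--
-- def tree(): return defaultdict(tree)
--
-- def directories(path):
--     for directory in path.split('/'):
--         if directory != ROOT_DIR:
--             yield directory
--
-- def file_fixit(existing, desired):
--     result = 0
--     file_system = tree()
--
--     for path in existing:
--         t = file_system
--         for directory in directories(path):
--             t = t[directory]
--
--     for path in desired:
--         t = file_system
--         for directory in directories(path):
--             if directory not in t:
--                 result += 1
--             t = t[directory]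
--
--     return result
-- ===== SOURCE B (Python) =====
-- def file_fixit(existing, desired):
--     seen = set()
--     for path in existing:
--         prefix = ()
--         for d in path.split('/'):
--             if d != '':
--                 prefix = prefix + (d,)
--                 seen.add(prefix)
--     result = 0
--     for path in desired:
--         prefix = ()
--         for d in path.split('/'):
--             if d != '':
--                 prefix = prefix + (d,)
--                 if prefix not in seen:
--                     result += 1
--                     seen.add(prefix)
--     return result
-- ===== Notes on version B (the rewrite author's own statement) =====
-- stated objective: simpler
-- what changed: Replaces the nested-defaultdict trie (a recursive tree built and walked node by node) with one flat set of cumulative directory-prefix tuples: each path contributes its prefixes to the set, and a desired directory is 'missing' exactly when its prefix tuple is not yet in the set.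
import Mathlib
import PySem

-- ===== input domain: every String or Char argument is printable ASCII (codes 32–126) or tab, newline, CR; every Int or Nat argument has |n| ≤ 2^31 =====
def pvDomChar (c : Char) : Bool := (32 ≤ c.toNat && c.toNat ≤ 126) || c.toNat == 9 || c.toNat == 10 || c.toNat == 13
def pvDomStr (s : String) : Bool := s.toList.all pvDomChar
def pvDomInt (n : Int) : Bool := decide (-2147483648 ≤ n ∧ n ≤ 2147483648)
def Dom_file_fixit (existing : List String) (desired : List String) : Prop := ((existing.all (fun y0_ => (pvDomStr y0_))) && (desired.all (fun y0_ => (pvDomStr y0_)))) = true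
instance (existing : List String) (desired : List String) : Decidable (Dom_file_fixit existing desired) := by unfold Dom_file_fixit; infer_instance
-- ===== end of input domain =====

-- B replaces A's nested-defaultdict trie by one flat set of cumulative directory-prefix tuples (objective: simpler).

-- ===== PORT A =====
-- tree(): a node of the defaultdict-of-defaultdict trie; children as an explicit
-- association structure (a mutual pair because a nested inductive is not allowed).
mutual
inductive PvTrie where
  | node : PvTrieChildren → PvTrie
deriving DecidableEq, Repr
inductive PvTrieChildren where
  | nil : PvTrieChildren
  | cons : String → PvTrie → PvTrieChildren → PvTrieChildren
deriving DecidableEq, Repr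
end

-- 'directory in t' lookup among a node's children
def pvFind : PvTrieChildren → String → Option PvTrie
  | .nil, _ => none
  | .cons k c rest, d => if k = d then some c else pvFind rest d

-- store/overwrite a child (defaultdict inserts a missing key at the end)
def pvSet : PvTrieChildren → String → PvTrie → PvTrieChildren
  | .nil, d, c => .cons d c .nil
  | .cons k c0 rest, d, c => if k = d then .cons k c rest else .cons k c0 (pvSet rest d c)

def pvChildren : PvTrie → PvTrieChildren
  | .node cs => cs

-- directories(path): components of path.split('/') that are not ROOT_DIR = ''
def pvDirs (path : String) : List String :=
  ((PySem.Str.split? path "/").getD []).filter (fun d => d ≠ "")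

-- first loop body: 't = t[directory]' repeatedly (defaultdict creates missing nodes)
def pvInsert : PvTrie → List String → PvTrie
  | t, [] => t
  | t, d :: ds =>
    let child := (pvFind (pvChildren t) d).getD (.node .nil)
    .node (pvSet (pvChildren t) d (pvInsert child ds))

-- second loop body: count 'directory not in t', then 't = t[directory]'
def pvDescend : PvTrie → List String → Int × PvTrie
  | t, [] => (0, t)
  | t, d :: ds =>
    let miss : Int := if (pvFind (pvChildren t) d).isSome then 0 else 1
    let child := (pvFind (pvChildren t) d).getD (.node .nil)
    let r := pvDescend child ds
    (miss + r.1, .node (pvSet (pvChildren t) d r.2))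

def file_fixit (existing : List String) (desired : List String) : Int :=
  let fs := existing.foldl (fun t path => pvInsert t (pvDirs path)) (.node .nil)
  (desired.foldl (fun (acc : Int × PvTrie) path =>
      let r := pvDescend acc.2 (pvDirs path)
      (acc.1 + r.1, r.2)) ((0 : Int), fs)).1

-- ===== PORT B =====
-- inner-loop body of B's first loop: skip '', extend the prefix, add it to seen
def pvStepE (st : List String × PySem.Set (List String)) (d : String) :
    List String × PySem.Set (List String) :=
  if d = "" then st
  else (st.1 ++ [d], PySem.Set.add st.2 (st.1 ++ [d]))

-- inner-loop body of B's second loop: skip '', extend the prefix, count+add if unseen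
def pvStepD (st : List String × Int × PySem.Set (List String)) (d : String) :
    List String × Int × PySem.Set (List String) :=
  if d = "" then st
  else if PySem.Set.contains st.2.2 (st.1 ++ [d]) then (st.1 ++ [d], st.2.1, st.2.2)
  else (st.1 ++ [d], st.2.1 + 1, PySem.Set.add st.2.2 (st.1 ++ [d]))

def file_fixit_alt (existing : List String) (desired : List String) : Int :=
  let seen := existing.foldl
    (fun S path => (((PySem.Str.split? path "/").getD []).foldl pvStepE (([] : List String), S)).2)
    (PySem.Set.empty : PySem.Set (List String))
  (desired.foldl
    (fun (acc : Int × PySem.Set (List String)) path =>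
      (((PySem.Str.split? path "/").getD []).foldl pvStepD (([] : List String), acc.1, acc.2)).2)
    ((0 : Int), seen)).1

-- ===== PRECONDITION & SPEC =====
def Spec_file_fixit (existing : List String) (desired : List String) (out : Int) : Prop := out = file_fixit_alt existing desired
instance (existing : List String) (desired : List String) (out : Int) : Decidable (Spec_file_fixit existing desired out) := by unfold Spec_file_fixit; infer_instance

-- ===== CLAIM (what is proved, stated in full; the proofs are below) =====
def Claim_equal_file_fixit : Prop := ∀ (existing : List String) (desired : List String), Dom_file_fixit existing desired → Spec_file_fixit existing desired (file_fixit existing desired)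

-- ===== LEMMAS AND PROOFS =====

-- the plain (''-free) bodies of B's inner folds
def pvAccE (st : List String × PySem.Set (List String)) (d : String) :
    List String × PySem.Set (List String) :=
  (st.1 ++ [d], PySem.Set.add st.2 (st.1 ++ [d]))

def pvAccD (st : List String × Int × PySem.Set (List String)) (d : String) :
    List String × Int × PySem.Set (List String) :=
  if PySem.Set.contains st.2.2 (st.1 ++ [d]) then (st.1 ++ [d], st.2.1, st.2.2)
  else (st.1 ++ [d], st.2.1 + 1, PySem.Set.add st.2.2 (st.1 ++ [d]))

lemma pvStepE_filter (l : List String) (st : List String × PySem.Set (List String)) :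
    l.foldl pvStepE st = (l.filter (fun d => d ≠ "")).foldl pvAccE st := by
  rw [List.foldl_filter]
  induction l generalizing st with
  | nil => rfl
  | cons d ds ih =>
    simp only [List.foldl_cons, ih]
    congr 1
    by_cases h : d = "" <;> simp [pvStepE, pvAccE, h]

lemma pvStepD_filter (l : List String) (st : List String × Int × PySem.Set (List String)) :
    l.foldl pvStepD st = (l.filter (fun d => d ≠ "")).foldl pvAccD st := by
  rw [List.foldl_filter]
  induction l generalizing st with
  | nil => rfl
  | cons d ds ih =>
    simp only [List.foldl_cons, ih]
    congr 1
    by_cases h : d = "" <;> simp [pvStepD, pvAccD, h]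

-- the paths present in a trie (every node on the way exists)
def pvContains : PvTrie → List String → Bool
  | _, [] => true
  | t, d :: ds =>
    match pvFind (pvChildren t) d with
    | some c => pvContains c ds
    | none => false

theorem pvFind_pvSet : ∀ (cs : PvTrieChildren) (d e : String) (c : PvTrie),
    pvFind (pvSet cs d c) e = if e = d then some c else pvFind cs e
  | .nil, d, e, c => by by_cases h : e = d <;> simp [pvSet, pvFind, h, Ne.symm]
  | .cons k c0 rest, d, e, c => by
    by_cases hk : k = d
    · by_cases he : e = d <;> simp [pvSet, pvFind, hk, he, Ne.symm]
    · by_cases he : e = k <;>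
        simp [pvSet, pvFind, hk, he, pvFind_pvSet rest d e c, Ne.symm]

-- the invariant: below prefix q, the trie and the seen-set agree on every nonempty path
def pvINV (q : List String) (t : PvTrie) (S : PySem.Set (List String)) : Prop :=
  ∀ p, p ≠ [] → (pvContains t p = true ↔ (q ++ p) ∈ S)

lemma pvINV_child_some (q : List String) (t c : PvTrie) (S : PySem.Set (List String)) (d : String)
    (hf : pvFind (pvChildren t) d = some c) (h : pvINV q t S) : pvINV (q ++ [d]) c S := by
  intro p hp
  have hh := h (d :: p) (by simp)
  simp only [pvContains, hf] at hh
  simpa [List.append_assoc] using hh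

-- one desired path: trie descent and set scan produce the same count and stay in sync
lemma pvDescend_eq (ds : List String) (q : List String) (t : PvTrie) (c : Int)
    (S : PySem.Set (List String)) (h : pvINV q t S) :
    (ds.foldl pvAccD (q, c, S)).2.1 = c + (pvDescend t ds).1 ∧
    pvINV q (pvDescend t ds).2 (ds.foldl pvAccD (q, c, S)).2.2 ∧
    (∀ x ∈ (ds.foldl pvAccD (q, c, S)).2.2, x ∈ S ∨ ∃ y, y ≠ [] ∧ x = q ++ y) ∧
    (∀ x ∈ S, x ∈ (ds.foldl pvAccD (q, c, S)).2.2) := by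
  induction ds generalizing q t c S with
  | nil =>
    refine ⟨by simp [pvDescend], by simpa [pvDescend] using h, fun x hx => Or.inl hx, fun x hx => hx⟩
  | cons d ds ih =>
    cases hf : pvFind (pvChildren t) d with
    | some child =>
      have hmem : (q ++ [d]) ∈ S := by
        have hh := h [d] (by simp)
        simp [pvContains, hf] at hh
        exact hh
      have hstep : pvAccD (q, c, S) d = (q ++ [d], c, S) := by
        simp [pvAccD, hmem]
      have hchild : pvINV (q ++ [d]) child S := pvINV_child_some q t child S d hf h
      obtain ⟨hc, hi, hext, hmono⟩ := ih (q ++ [d]) child c S hchild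
      refine ⟨?_, ?_, ?_, ?_⟩
      · simp only [List.foldl_cons, hstep, pvDescend, hf, hc]
        simp
      · simp only [List.foldl_cons, hstep, pvDescend, hf]
        intro p hp
        cases p with
        | nil => exact absurd rfl hp
        | cons e rest =>
          simp only [pvContains, pvChildren, pvFind_pvSet]
          by_cases he : e = d
          · subst he
            cases rest with
            | nil =>
              simp only [if_pos rfl]
              constructor
              · intro _; exact hmono _ hmem
              · intro _; rfl
            | cons r rs =>
              simp only [if_pos rfl]
              have hh := hi (r :: rs) (by simp)
              simpa [List.append_assoc] using hh
          · simp only [if_neg he]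
            have hbase := h (e :: rest) (by simp)
            simp only [pvContains] at hbase
            constructor
            · intro hx; exact hmono _ (hbase.mp hx)
            · intro hx
              rcases hext _ hx with hx' | ⟨y, hy, hxy⟩
              · exact hbase.mpr hx'
              · exfalso
                have h2 : q ++ d :: y = q ++ e :: rest := by
                  simpa [List.append_assoc] using hxy.symm
                have h3 := List.append_cancel_left h2
                exact he (by injection h3 with h1 _; exact h1.symm)
      · intro x hx
        simp only [List.foldl_cons, hstep] at hx
        rcases hext x hx with hx' | ⟨y, hy, hxy⟩
        · exact Or.inl hx'
        · exact Or.inr ⟨d :: y, by simp, by simpa [List.append_assoc] using hxy⟩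
      · intro x hx
        simp only [List.foldl_cons, hstep]
        exact hmono x hx
    | none =>
      have hnmem : (q ++ [d]) ∉ S := by
        have hh := h [d] (by simp)
        simp [pvContains, hf] at hh
        exact hh
      have hstep : pvAccD (q, c, S) d = (q ++ [d], c + 1, PySem.Set.add S (q ++ [d])) := by
        simp [pvAccD, hnmem]
      have hchild : pvINV (q ++ [d]) (.node .nil) (PySem.Set.add S (q ++ [d])) := by
        intro p hp
        cases p with
        | nil => exact absurd rfl hp
        | cons r rs =>
          simp only [pvContains, pvChildren, pvFind]
          constructor
          · intro hx; exact absurd hx (by simp)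
          · intro hx
            rcases (PySem.Set.mem_add S _ _).mp hx with hx' | hx'
            · exfalso
              have hh := h (d :: r :: rs) (by simp)
              simp only [pvContains, hf] at hh
              have hfalse := hh.mpr (by simpa [List.append_assoc] using hx')
              simp at hfalse
            · exfalso
              have hlen := congrArg List.length hx'
              simp at hlen
      obtain ⟨hc, hi, hext, hmono⟩ := ih (q ++ [d]) (.node .nil) (c + 1) (PySem.Set.add S (q ++ [d])) hchild
      refine ⟨?_, ?_, ?_, ?_⟩
      · simp only [List.foldl_cons, hstep, pvDescend, hf, hc]
        simp; ring
      · simp only [List.foldl_cons, hstep, pvDescend, hf]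
        intro p hp
        cases p with
        | nil => exact absurd rfl hp
        | cons e rest =>
          simp only [pvContains, pvChildren, pvFind_pvSet]
          by_cases he : e = d
          · subst he
            cases rest with
            | nil =>
              simp only [if_pos rfl]
              constructor
              · intro _; exact hmono _ ((PySem.Set.mem_add S _ _).mpr (Or.inr rfl))
              · intro _; rfl
            | cons r rs =>
              simp only [if_pos rfl]
              have hh := hi (r :: rs) (by simp)
              simpa [List.append_assoc] using hh
          · simp only [if_neg he]
            have hbase := h (e :: rest) (by simp)
            simp only [pvContains] at hbase
            constructor
            · intro hx
              exact hmono _ ((PySem.Set.mem_add S _ _).mpr (Or.inl (hbase.mp hx)))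
            · intro hx
              rcases hext _ hx with hx' | ⟨y, hy, hxy⟩
              · rcases (PySem.Set.mem_add S _ _).mp hx' with hx'' | hx''
                · exact hbase.mpr hx''
                · exfalso
                  have h3 : e :: rest = [d] := List.append_cancel_left hx''
                  simp at h3
                  exact he h3.1
              · exfalso
                have h2 : q ++ d :: y = q ++ e :: rest := by
                  simpa [List.append_assoc] using hxy.symm
                have h3 := List.append_cancel_left h2
                exact he (by injection h3 with h1 _; exact h1.symm)
      · intro x hx
        simp only [List.foldl_cons, hstep] at hx
        rcases hext x hx with hx' | ⟨y, hy, hxy⟩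
        · rcases (PySem.Set.mem_add S _ _).mp hx' with hx'' | hx''
          · exact Or.inl hx''
          · exact Or.inr ⟨[d], by simp, hx''⟩
        · exact Or.inr ⟨d :: y, by simp, by simpa [List.append_assoc] using hxy⟩
      · intro x hx
        simp only [List.foldl_cons, hstep]
        exact hmono x ((PySem.Set.mem_add S _ _).mpr (Or.inl hx))

-- one existing path: trie insertion and prefix-adding keep the invariant
lemma pvInsert_eq (ds : List String) (q : List String) (t : PvTrie)
    (S : PySem.Set (List String)) (h : pvINV q t S) :
    pvINV q (pvInsert t ds) (ds.foldl pvAccE (q, S)).2 ∧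
    (∀ x ∈ (ds.foldl pvAccE (q, S)).2, x ∈ S ∨ ∃ y, y ≠ [] ∧ x = q ++ y) ∧
    (∀ x ∈ S, x ∈ (ds.foldl pvAccE (q, S)).2) := by
  induction ds generalizing q t S with
  | nil =>
    refine ⟨by simpa [pvInsert] using h, fun x hx => Or.inl hx, fun x hx => hx⟩
  | cons d ds ih =>
    have hstep : pvAccE (q, S) d = (q ++ [d], PySem.Set.add S (q ++ [d])) := rfl
    have hchild : pvINV (q ++ [d]) ((pvFind (pvChildren t) d).getD (.node .nil))
        (PySem.Set.add S (q ++ [d])) := by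
      intro p hp
      cases p with
      | nil => exact absurd rfl hp
      | cons r rs =>
        have hfull := h (d :: r :: rs) (by simp)
        simp only [pvContains] at hfull
        cases hf : pvFind (pvChildren t) d with
        | some child =>
          simp only [Option.getD_some]
          rw [hf] at hfull
          constructor
          · intro hx
            exact (PySem.Set.mem_add S _ _).mpr (Or.inl (by
              have hh := hfull.mp (by simpa [pvContains] using hx)
              simpa [List.append_assoc] using hh))
          · intro hx
            rcases (PySem.Set.mem_add S _ _).mp hx with hx' | hx'
            · exact hfull.mpr (by simpa [List.append_assoc] using hx')
            · exfalso
              have hlen := congrArg List.length hx'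
              simp at hlen
        | none =>
          simp only [Option.getD_none]
          simp only [pvContains, pvChildren, pvFind]
          rw [hf] at hfull
          constructor
          · intro hx; exact absurd hx (by simp)
          · intro hx
            rcases (PySem.Set.mem_add S _ _).mp hx with hx' | hx'
            · exact absurd (hfull.mpr (by simpa [List.append_assoc] using hx')) (by simp)
            · exfalso
              have hlen := congrArg List.length hx'
              simp at hlen
    obtain ⟨hi, hext, hmono⟩ := ih (q ++ [d]) _ (PySem.Set.add S (q ++ [d])) hchild
    refine ⟨?_, ?_, ?_⟩
    · simp only [List.foldl_cons, hstep, pvInsert]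
      intro p hp
      cases p with
      | nil => exact absurd rfl hp
      | cons e rest =>
        simp only [pvContains, pvChildren, pvFind_pvSet]
        by_cases he : e = d
        · subst he
          cases rest with
          | nil =>
            simp only [if_pos rfl]
            constructor
            · intro _; exact hmono _ ((PySem.Set.mem_add S _ _).mpr (Or.inr rfl))
            · intro _; rfl
          | cons r rs =>
            simp only [if_pos rfl]
            have hh := hi (r :: rs) (by simp)
            simpa [List.append_assoc] using hh
        · simp only [if_neg he]
          have hbase := h (e :: rest) (by simp)
          simp only [pvContains] at hbase
          constructor
          · intro hx
            exact hmono _ ((PySem.Set.mem_add S _ _).mpr (Or.inl (hbase.mp hx)))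
          · intro hx
            rcases hext _ hx with hx' | ⟨y, hy, hxy⟩
            · rcases (PySem.Set.mem_add S _ _).mp hx' with hx'' | hx''
              · exact hbase.mpr hx''
              · exfalso
                have h3 : e :: rest = [d] := List.append_cancel_left hx''
                simp at h3
                exact he h3.1
            · exfalso
              have h2 : q ++ d :: y = q ++ e :: rest := by
                simpa [List.append_assoc] using hxy.symm
              have h3 := List.append_cancel_left h2
              exact he (by injection h3 with h1 _; exact h1.symm)
    · intro x hx
      simp only [List.foldl_cons, hstep] at hx
      rcases hext x hx with hx' | ⟨y, hy, hxy⟩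
      · rcases (PySem.Set.mem_add S _ _).mp hx' with hx'' | hx''
        · exact Or.inl hx''
        · exact Or.inr ⟨[d], by simp, hx''⟩
      · exact Or.inr ⟨d :: y, by simp, by simpa [List.append_assoc] using hxy⟩
    · intro x hx
      simp only [List.foldl_cons, hstep]
      exact hmono x ((PySem.Set.mem_add S _ _).mpr (Or.inl hx))

lemma pvExisting_fold (existing : List String) (t : PvTrie) (S : PySem.Set (List String))
    (h : pvINV [] t S) :
    pvINV [] (existing.foldl (fun t path => pvInsert t (pvDirs path)) t)
      (existing.foldl
        (fun S path => (((PySem.Str.split? path "/").getD []).foldl pvStepE (([] : List String), S)).2)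
        S) := by
  induction existing generalizing t S with
  | nil => exact h
  | cons path rest ih =>
    simp only [List.foldl_cons]
    rw [pvStepE_filter,
      show (((PySem.Str.split? path "/").getD []).filter (fun d => d ≠ "")) = pvDirs path from rfl]
    exact ih _ _ (pvInsert_eq (pvDirs path) [] t S h).1
lemma pvDesired_fold (desired : List String) (c : Int) (t : PvTrie)
    (S : PySem.Set (List String)) (h : pvINV [] t S) :
    (desired.foldl (fun (acc : Int × PvTrie) path =>
        let r := pvDescend acc.2 (pvDirs path)
        (acc.1 + r.1, r.2)) (c, t)).1 =
    (desired.foldl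
      (fun (acc : Int × PySem.Set (List String)) path =>
        (((PySem.Str.split? path "/").getD []).foldl pvStepD (([] : List String), acc.1, acc.2)).2)
      (c, S)).1 := by
  induction desired generalizing c t S with
  | nil => rfl
  | cons path rest ih =>
    simp only [List.foldl_cons]
    rw [pvStepD_filter,
      show (((PySem.Str.split? path "/").getD []).filter (fun d => d ≠ "")) = pvDirs path from rfl]
    obtain ⟨hc, hi, -, -⟩ := pvDescend_eq (pvDirs path) [] t c S h
    have hpair : ((pvDirs path).foldl pvAccD ([], c, S)).2 =
        (c + (pvDescend t (pvDirs path)).1, ((pvDirs path).foldl pvAccD ([], c, S)).2.2) := by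
      rw [← hc]
    rw [hpair]
    exact ih _ _ _ hi

-- ===== VERDICT (by name: the statement is the Claim_ definition above) =====
theorem file_fixit_spec : Claim_equal_file_fixit := by
  intro existing desired _
  unfold Spec_file_fixit file_fixit file_fixit_alt
  exact pvDesired_fold desired 0 _ _
    (pvExisting_fold existing (.node .nil) PySem.Set.empty
      (by intro p hp; cases p with
          | nil => exact absurd rfl hp
          | cons r rs => simp [pvContains, pvChildren, pvFind, PySem.Set.empty]))
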